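-- pv_equiv track=rewrite | github.com/kyh0726/DailyCoding | 프로그래머스/2/340212. ［PCCP 기출문제］ 2번 ／ 퍼즐 게임 챌린지/［PCCP 기출문제］ 2번 ／ 퍼즐 게임 챌린지.py | solution
-- ===== SOURCE A (Python) =====
-- def solution(diffs, times, limit):
--
--     # 퍼즐의 난이도 <= 레벨이면 현재 퍼즐의 소요시간
--     # 퍼즐의 난이도 > 레벨이면 난이도 차이 횟수만큼 틀림 (틀릴 때마다 이전 퍼즐 소요시간(이전 퍼즐에서 틀렸던게 연쇄작용하지는 X) + 현재 퍼즐 소요시간 발생)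
--     # 이분탐색 접근
--
--     def calc_time(level):
--         N = len(diffs)
--         total = 0
--         for i in range(N):
--             target_time = times[i]
--             target_level = diffs[i]
--             if level < target_level:
--                 total += (target_level - level + 1) * target_time + (target_level - level) * times[i-1]
--             else:
--                 total += target_time
--
--         return total
--
--     def binary_search():
--         answer = 0
--         left = 1
--         right = max(diffs)
--         while left <= right:
--             middle = (left + right) // 2
--             time = calc_time(middle)
--
--             if time <= limit:
--                 answer = middle
--                 right = middle - 1
--             else:
--                 left = middle + 1
--         return answer
--
--
--
--
--
--
--
--     return binary_search()
-- ===== SOURCE B (Python) =====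
-- def solution(diffs, times, limit):
--     # Algebraic refactor: total(level) = base + sum over pairs with d > level of (d-level)*w,
--     # where w[i] = times[i] + times[i-1] (Python wraparound: w[0] uses times[-1]).
--     # Pairs are sorted by difficulty once; each feasibility check is a binary search
--     # over the sorted difficulties plus prefix-sum lookups instead of a full rescan.
--     n = len(diffs)
--     base = sum(times[:n])
--     ws = [times[i] + times[i - 1] for i in range(n)]
--     pairs = sorted(zip(diffs, ws), key=lambda p: p[0])
--     ds = [p[0] for p in pairs]
--     m = len(pairs)
--     pw = _prefix([p[1] for p in pairs])
--     pdw = _prefix([p[0] * p[1] for p in pairs])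
--
--     def feas_time(level):
--         idx = _bisect_right(ds, level)
--         return base + (pdw[m] - pdw[idx]) - level * (pw[m] - pw[idx])
--
--     answer = 0
--     left = 1
--     right = max(diffs)
--     while left <= right:
--         middle = (left + right) // 2
--         if feas_time(middle) <= limit:
--             answer = middle
--             right = middle - 1
--         else:
--             left = middle + 1
--     return answer
--
--
-- def _prefix(vals):
--     out = [0]
--     s = 0
--     for v in vals:
--         s += v
--         out.append(s)
--     return out
--
--
-- def _bisect_right(a, x):
--     lo, hi = 0, len(a)
--     while lo < hi:
--         mid = (lo + hi) // 2
--         if x < a[mid]: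
--             hi = mid
--         else:
--             lo = mid + 1
--     return lo
-- ===== Notes on version B (the rewrite author's own statement) =====
-- stated objective: faster
-- what changed: B rewrites the per-level cost as base + sum over difficulties d > level of (d-level)*(times[i]+times[i-1]), precomputes the pairs sorted by difficulty with prefix sums, and answers each feasibility probe of the (unchanged) binary search by a bisect on the sorted difficulties plus two prefix-sum lookups instead of A's O(n) rescan of both lists.
-- outside the precondition, e.g. on solution([0], [], 0): A returns 0, B raises IndexError
import Mathlib
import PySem

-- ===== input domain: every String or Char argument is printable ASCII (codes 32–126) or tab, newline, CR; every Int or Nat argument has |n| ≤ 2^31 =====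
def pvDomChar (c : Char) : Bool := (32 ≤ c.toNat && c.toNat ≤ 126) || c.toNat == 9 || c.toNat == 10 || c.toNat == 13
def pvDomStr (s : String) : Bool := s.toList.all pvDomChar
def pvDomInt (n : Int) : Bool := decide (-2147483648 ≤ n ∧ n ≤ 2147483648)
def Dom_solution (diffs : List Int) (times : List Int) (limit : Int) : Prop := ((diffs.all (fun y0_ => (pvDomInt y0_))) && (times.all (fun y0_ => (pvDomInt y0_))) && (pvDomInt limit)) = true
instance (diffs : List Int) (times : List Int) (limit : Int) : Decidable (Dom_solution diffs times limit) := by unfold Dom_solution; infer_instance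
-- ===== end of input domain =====

-- B sorts the (difficulty, weight) pairs once and answers each feasibility probe of the
-- (unchanged) binary search by a bisect + prefix-sum lookup instead of A's linear rescan.
-- (Both while-loops are ported with a fuel bound (right-left+1).toNat, which the loop never
-- exhausts since each step shrinks the interval; this only makes the recursion structural.)

-- ===== PORT A =====
-- A's inner calc_time(level): linear scan over range(len(diffs))
def calcA (diffs times : List Int) (level : Int) : Int :=
  (PySem.List.pyRange 0 (diffs.length : Int)).foldl
    (fun total i =>
      let target_time := PySem.List.pyGetD times i 0
      let target_level := PySem.List.pyGetD diffs i 0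
      if level < target_level then
        total + (target_level - level + 1) * target_time
              + (target_level - level) * PySem.List.pyGetD times (i - 1) 0
      else
        total + target_time) 0

-- A's binary_search() while-loop
def bsA (diffs times : List Int) (limit : Int) : Nat → Int → Int → Int → Int
  | 0, answer, _, _ => answer
  | fuel + 1, answer, left, right =>
    if left ≤ right then
      let middle := PySem.Int.floordiv (left + right) 2
      let time := calcA diffs times middle
      if time ≤ limit then bsA diffs times limit fuel middle left (middle - 1)
      else bsA diffs times limit fuel answer (middle + 1) right
    else answer

def solution (diffs : List Int) (times : List Int) (limit : Int) : Int :=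
  let right := (PySem.List.max? diffs (fun x => x)).getD 0
  bsA diffs times limit (right - 1 + 1).toNat 0 1 right

-- ===== PORT B =====
-- helper _prefix(vals): prefix sums [0, v0, v0+v1, …]
def prefixAux (s : Int) : List Int → List Int
  | [] => [s]
  | v :: vs => s :: prefixAux (s + v) vs

def prefixB (vals : List Int) : List Int := prefixAux 0 vals

-- helper _bisect_right(a, x) (fuel bound (hi-lo).toNat, never exhausted)
def bisectAux (a : List Int) (x : Int) : Nat → Int → Int → Int
  | 0, lo, _ => lo
  | fuel + 1, lo, hi =>
    if lo < hi then
      let mid := PySem.Int.floordiv (lo + hi) 2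
      if x < PySem.List.pyGetD a mid 0 then bisectAux a x fuel lo mid
      else bisectAux a x fuel (mid + 1) hi
    else lo

-- B's feas_time(level)
def feasB (base : Int) (ds pw pdw : List Int) (m level : Int) : Int :=
  let idx := bisectAux ds level ((ds.length : Int) - 0).toNat 0 ((ds.length : Int))
  base + (PySem.List.pyGetD pdw m 0 - PySem.List.pyGetD pdw idx 0)
       - level * (PySem.List.pyGetD pw m 0 - PySem.List.pyGetD pw idx 0)

-- B's while-loop (the same binary search, feasibility read off the tables)
def bsB (base : Int) (ds pw pdw : List Int) (m limit : Int) : Nat → Int → Int → Int → Int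
  | 0, answer, _, _ => answer
  | fuel + 1, answer, left, right =>
    if left ≤ right then
      let middle := PySem.Int.floordiv (left + right) 2
      if feasB base ds pw pdw m middle ≤ limit then bsB base ds pw pdw m limit fuel middle left (middle - 1)
      else bsB base ds pw pdw m limit fuel answer (middle + 1) right
    else answer

def solution_alt (diffs : List Int) (times : List Int) (limit : Int) : Int :=
  let n : Int := (diffs.length : Int)
  let base := (PySem.List.slice times none (some n)).sum
  let ws := (PySem.List.pyRange 0 n).map
    (fun i => PySem.List.pyGetD times i 0 + PySem.List.pyGetD times (i - 1) 0)
  let pairs := PySem.List.sorted (diffs.zip ws) (fun p => p.1)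
  let ds := pairs.map (fun p => p.1)
  let m : Int := (pairs.length : Int)
  let pw := prefixB (pairs.map (fun p => p.2))
  let pdw := prefixB (pairs.map (fun p => p.1 * p.2))
  let right := (PySem.List.max? diffs (fun x => x)).getD 0
  bsB base ds pw pdw m limit (right - 1 + 1).toNat 0 1 right

-- ===== PRECONDITION & SPEC =====
-- Pre_ excludes empty diffs (A's max() raises ValueError) and times shorter than diffs:
-- there A raises IndexError whenever the loop probes a level (max(diffs) ≥ 1), and on the
-- remaining degenerate corner (max(diffs) < 1) B itself raises IndexError building its tables.
def Pre_solution (diffs : List Int) (times : List Int) (limit : Int) : Prop :=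
  diffs ≠ [] ∧ diffs.length ≤ times.length
instance (diffs : List Int) (times : List Int) (limit : Int) : Decidable (Pre_solution diffs times limit) := by unfold Pre_solution; infer_instance

def pvWitness_solution : List Int × List Int × Int := ([3, 1, 2], [2, 3, 1], 10)

def Spec_solution (diffs : List Int) (times : List Int) (limit : Int) (out : Int) : Prop := out = solution_alt diffs times limit
instance (diffs : List Int) (times : List Int) (limit : Int) (out : Int) : Decidable (Spec_solution diffs times limit out) := by unfold Spec_solution; infer_instance

-- ===== CLAIM (what is proved, stated in full; the proofs are below) =====
def Claim_equal_solution : Prop := ∀ (diffs : List Int) (times : List Int) (limit : Int), Dom_solution diffs times limit → Pre_solution diffs times limit → Spec_solution diffs times limit (solution diffs times limit)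

-- ===== LEMMAS AND PROOFS =====

-- contribution of one (difficulty, weight) pair at a given level
def contribL (level : Int) (p : Int × Int) : Int := if level < p.1 then (p.1 - level) * p.2 else 0

-- the (difficulty, weight) pair list, indexed by position
def pairsIdx (diffs times : List Int) : List (Int × Int) :=
  (List.range diffs.length).map
    (fun (i : Nat) => (PySem.List.pyGetD diffs ((i : Int)) 0,
               PySem.List.pyGetD times ((i : Int)) 0 + PySem.List.pyGetD times ((i : Int) - 1) 0))

lemma take_eq_map_range (times : List Int) (n : Nat) (h : n ≤ times.length) :
    (List.range n).map (fun (i : Nat) => PySem.List.pyGetD times (i : Int) 0) = times.take n := by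
  apply List.ext_getElem
  · simpa using h
  · intro i h1 h2
    simp only [List.getElem_map, List.getElem_range]
    rw [PySem.List.pyGetD_natCast, List.getD_eq_getElem, List.getElem_take]

lemma calcA_eq_sum (diffs times : List Int) (level : Int)
    (hlen : diffs.length ≤ times.length) :
    calcA diffs times level = (times.take diffs.length).sum
      + ((pairsIdx diffs times).map (contribL level)).sum := by
  unfold calcA pairsIdx
  rw [PySem.List.pyRange_zero_natCast, List.foldl_map]
  have hstep : (fun (total : Int) (k : Nat) =>
      let target_time := PySem.List.pyGetD times (k : Int) 0
      let target_level := PySem.List.pyGetD diffs (k : Int) 0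
      if level < target_level then
        total + (target_level - level + 1) * target_time
              + (target_level - level) * PySem.List.pyGetD times ((k : Int) - 1) 0
      else total + target_time)
      = fun total (k : Nat) => total + (PySem.List.pyGetD times (k : Int) 0
          + contribL level (PySem.List.pyGetD diffs (k : Int) 0,
              PySem.List.pyGetD times (k : Int) 0 + PySem.List.pyGetD times ((k : Int) - 1) 0)) := by
    funext total k
    simp only [contribL]
    split_ifs <;> ring
  rw [hstep, PySem.List.foldl_add]
  rw [← take_eq_map_range times _ hlen, List.map_map, ← PySem.List.sum_map_add_int]
  simp

lemma zip_ws_eq_pairsIdx (diffs times : List Int) :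
    diffs.zip ((PySem.List.pyRange 0 ((diffs.length : Int))).map
      (fun i => PySem.List.pyGetD times i 0 + PySem.List.pyGetD times (i - 1) 0))
    = pairsIdx diffs times := by
  unfold pairsIdx
  rw [PySem.List.pyRange_zero_natCast, List.map_map]
  apply List.ext_getElem
  · simp
  · intro i h1 h2
    simp only [List.getElem_zip, List.getElem_map, List.getElem_range, Function.comp_apply]
    simp at h1
    refine Prod.ext ?_ rfl
    simp only
    rw [PySem.List.pyGetD_eq_getElem diffs 0 (by omega) (by exact_mod_cast h1)]
    simp

lemma bisect_inv (a : List Int) (x : Int) (hs : List.Pairwise (· ≤ ·) a) :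
    ∀ (fuel : Nat) (lo hi : Int), (hi - lo).toNat ≤ fuel → 0 ≤ lo → lo ≤ hi → hi ≤ (a.length : Int) →
    (∀ (j : Nat) (hj : j < a.length), (j : Int) < lo → a[j] ≤ x) →
    (∀ (j : Nat) (hj : j < a.length), hi ≤ (j : Int) → x < a[j]) →
    ∃ r : Nat, bisectAux a x fuel lo hi = (r : Int) ∧ lo ≤ (r : Int) ∧ (r : Int) ≤ hi ∧
      (∀ (j : Nat) (hj : j < a.length), j < r → a[j] ≤ x) ∧
      (∀ (j : Nat) (hj : j < a.length), r ≤ j → x < a[j]) := by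
  have hmono := List.pairwise_iff_getElem.mp hs
  intro fuel
  induction fuel with
  | zero =>
    intro lo hi hf h0 hlh hhl hlow hup
    have : lo = hi := by omega
    subst this
    refine ⟨lo.toNat, ?_, by omega, by omega, ?_, ?_⟩
    · simp [bisectAux, Int.toNat_of_nonneg h0]
    · intro j hj hjr; exact hlow j hj (by omega)
    · intro j hj hjr; exact hup j hj (by omega)
  | succ fuel ih =>
    intro lo hi hf h0 hlh hhl hlow hup
    by_cases h : lo < hi
    · have hm := PySem.Int.floordiv_two_mid_bounds (le_of_lt h)
      have h2 : PySem.Int.floordiv (lo + hi) 2 < hi :=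
        (PySem.Int.floordiv_lt_iff_lt_mul (by norm_num)).2 (by omega)
      set mid := PySem.Int.floordiv (lo + hi) 2 with hmid
      have hmidlt : mid.toNat < a.length := by omega
      have hget : PySem.List.pyGetD a mid 0 = a[mid.toNat] :=
        PySem.List.pyGetD_eq_getElem a 0 (by omega) (by omega)
      rw [bisectAux]
      simp only [if_pos h, ← hmid, hget]
      by_cases hc : x < a[mid.toNat]
      · rw [if_pos hc]
        refine (ih lo mid (by omega) h0 (by omega) (by omega) hlow ?_).imp ?_
        · intro j hj hjm
          rcases eq_or_lt_of_le hjm with he | hlt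
          · have : j = mid.toNat := by omega
            subst this; exact hc
          · exact lt_of_lt_of_le hc (hmono mid.toNat j hmidlt hj (by omega))
        · intro r ⟨h1, h2', h3, h4, h5⟩; exact ⟨h1, h2', by omega, h4, h5⟩
      · rw [if_neg hc]
        have hc' : a[mid.toNat] ≤ x := not_lt.mp hc
        refine (ih (mid + 1) hi (by omega) (by omega) (by omega) hhl ?_ hup).imp ?_
        · intro j hj hjm
          rcases eq_or_lt_of_le (show (j : Int) ≤ mid by omega) with he | hlt
          · have : j = mid.toNat := by omega
            subst this; exact hc'
          · exact le_trans (hmono j mid.toNat hj hmidlt (by omega)) hc'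
        · intro r ⟨h1, h2', h3, h4, h5⟩; exact ⟨h1, by omega, h3, h4, h5⟩
    · refine ⟨lo.toNat, ?_, by omega, by omega, ?_, ?_⟩
      · rw [bisectAux]; simp [if_neg h, Int.toNat_of_nonneg h0]
      · intro j hj hjr; exact hlow j hj (by omega)
      · intro j hj hjr; exact hup j hj (by omega)

lemma bisectAux_spec (a : List Int) (x : Int) (hs : List.Pairwise (· ≤ ·) a) :
    ∃ r : Nat, bisectAux a x ((a.length : Int) - 0).toNat 0 ((a.length : Int)) = (r : Int) ∧ r ≤ a.length ∧
      (∀ (j : Nat) (hj : j < a.length), j < r → a[j] ≤ x) ∧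
      (∀ (j : Nat) (hj : j < a.length), r ≤ j → x < a[j]) := by
  obtain ⟨r, h1, h2, h3, h4, h5⟩ :=
    bisect_inv a x hs ((a.length : Int) - 0).toNat 0 (a.length) (le_refl _)
      (le_refl _) (by positivity) (le_refl _)
      (by intro j hj hjl; omega) (by intro j hj hjl; omega)
  exact ⟨r, h1, by omega, h4, h5⟩

lemma prefixAux_getD (s : Int) (vals : List Int) (k : Nat) (hk : k ≤ vals.length) :
    (prefixAux s vals).getD k 0 = s + (vals.take k).sum := by
  induction vals generalizing s k with
  | nil => simp_all [prefixAux]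
  | cons v vs ih =>
    cases k with
    | zero => simp [prefixAux]
    | succ k =>
      simp only [prefixAux, List.getD_cons_succ, List.take_succ_cons, List.sum_cons]
      rw [ih _ _ (by simpa using hk)]; ring

lemma prefixB_pyGet (vals : List Int) (k : Nat) (hk : k ≤ vals.length) :
    PySem.List.pyGetD (prefixB vals) (k : Int) 0 = (vals.take k).sum := by
  rw [PySem.List.pyGetD_natCast, prefixB, prefixAux_getD _ _ _ hk, zero_add]

lemma prefixB_last (vals : List Int) :
    PySem.List.pyGetD (prefixB vals) ((vals.length : Int)) 0 = vals.sum := by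
  rw [prefixB_pyGet _ _ (le_refl _), List.take_length]

lemma feas_eq_base_add_contrib (base level : Int) (S : List (Int × Int))
    (hs : List.Pairwise (fun p q => p.1 ≤ q.1) S) :
    feasB base (S.map (fun p => p.1)) (prefixB (S.map (fun p => p.2)))
      (prefixB (S.map (fun p => p.1 * p.2))) ((S.length : Int)) level
    = base + (S.map (contribL level)).sum := by
  have hpair : List.Pairwise (· ≤ ·) (S.map (fun p => p.1)) := List.pairwise_map.mpr hs
  obtain ⟨r, hr, hrle, hlow, hup⟩ := bisectAux_spec (S.map (fun p => p.1)) level hpair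
  have hrle' : r ≤ S.length := by simpa using hrle
  unfold feasB
  simp only [List.length_map] at hr ⊢
  rw [hr]
  rw [show PySem.List.pyGetD (prefixB (List.map (fun p => p.1 * p.2) S)) ((S.length : Int)) 0
        = (List.map (fun p => p.1 * p.2) S).sum by
      simpa using prefixB_last (List.map (fun p => p.1 * p.2) S)]
  rw [show PySem.List.pyGetD (prefixB (List.map (fun p => p.2) S)) ((S.length : Int)) 0
        = (List.map (fun p => p.2) S).sum by
      simpa using prefixB_last (List.map (fun p => p.2) S)]
  rw [prefixB_pyGet _ _ (by simp; omega), prefixB_pyGet _ _ (by simp; omega)]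
  rw [← List.map_take, ← List.map_take]
  conv_rhs => rw [← List.take_append_drop r S]
  rw [List.map_append, List.sum_append]
  have htake0 : ((S.take r).map (contribL level)).sum = 0 := by
    apply List.sum_eq_zero
    intro y hy
    obtain ⟨p, hp, rfl⟩ := List.mem_map.mp hy
    obtain ⟨j, hj, rfl⟩ := List.mem_iff_getElem.mp hp
    have hjr : j < r := by simp at hj; omega
    have hjS : j < S.length := by simp at hj; omega
    have := hlow j (by simpa using hjS) (by simpa using hjr)
    simp only [List.getElem_map] at this
    simp [contribL, List.getElem_take, not_lt.mpr this]
  have hdrop : ((S.drop r).map (contribL level)).sum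
      = ((S.drop r).map (fun p => p.1 * p.2)).sum - level * ((S.drop r).map (fun p => p.2)).sum := by
    have hcong : (S.drop r).map (contribL level)
        = (S.drop r).map (fun p => p.1 * p.2 + (-level) * p.2) := by
      apply List.map_congr_left
      intro p hp
      obtain ⟨j, hj, rfl⟩ := List.mem_iff_getElem.mp hp
      have hjS : r + j < S.length := by simp at hj; omega
      have := hup (r + j) (by simpa using hjS) (by omega)
      simp only [List.getElem_map] at this
      simp only [List.getElem_drop] at this ⊢
      simp [contribL, if_pos this]; ring
    rw [hcong, PySem.List.sum_map_add_int, List.sum_map_mul_left]; ring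
  have hsplitdw : (S.map (fun p => p.1 * p.2)).sum
      = ((S.take r).map (fun p => p.1 * p.2)).sum + ((S.drop r).map (fun p => p.1 * p.2)).sum := by
    conv_lhs => rw [← List.take_append_drop r S]
    rw [List.map_append, List.sum_append]
  have hsplitw : (S.map (fun p => p.2)).sum
      = ((S.take r).map (fun p => p.2)).sum + ((S.drop r).map (fun p => p.2)).sum := by
    conv_lhs => rw [← List.take_append_drop r S]
    rw [List.map_append, List.sum_append]
  rw [htake0, hdrop, hsplitdw, hsplitw]; ring

lemma loops_eq (diffs times : List Int) (limit : Int)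
    (base : Int) (ds pw pdw : List Int) (m : Int)
    (hfe : ∀ level, feasB base ds pw pdw m level = calcA diffs times level) :
    ∀ (fuel : Nat) (answer left right : Int),
      bsA diffs times limit fuel answer left right = bsB base ds pw pdw m limit fuel answer left right := by
  intro fuel
  induction fuel with
  | zero => intro answer left right; rfl
  | succ fuel ih =>
    intro answer left right
    rw [bsA, bsB]
    by_cases h : left ≤ right
    · rw [if_pos h, if_pos h]
      simp only [hfe]
      by_cases hc : calcA diffs times (PySem.Int.floordiv (left + right) 2) ≤ limit
      · rw [if_pos hc, if_pos hc]; exact ih _ _ _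
      · rw [if_neg hc, if_neg hc]; exact ih _ _ _
    · rw [if_neg h, if_neg h]

-- ===== VERDICT (by name: the statement is the Claim_ definition above) =====
theorem solution_spec : Claim_equal_solution := by
  intro diffs times limit _hdom hpre
  obtain ⟨hne, hlen⟩ := hpre
  unfold Spec_solution solution solution_alt
  simp only
  rw [zip_ws_eq_pairsIdx diffs times]
  set S := PySem.List.sorted (pairsIdx diffs times) (fun p => p.1) with hS
  have hperm : S.Perm (pairsIdx diffs times) := PySem.List.sorted_perm _ _ _
  have hsorted : List.Pairwise (fun p q : Int × Int => p.1 ≤ q.1) S :=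
    PySem.List.sorted_pairwise _ _
  have hbase : (PySem.List.slice times none (some ((diffs.length : Int)))).sum
      = (times.take diffs.length).sum := by
    rw [PySem.List.slice_to times (by positivity)]
    simp
  have hfe : ∀ level,
      feasB ((PySem.List.slice times none (some ((diffs.length : Int)))).sum)
        (S.map (fun p => p.1)) (prefixB (S.map (fun p => p.2)))
        (prefixB (S.map (fun p => p.1 * p.2))) ((S.length : Int)) level
      = calcA diffs times level := by
    intro level
    rw [feas_eq_base_add_contrib _ _ _ hsorted, hbase,
        calcA_eq_sum diffs times level hlen,
        ((hperm.map (contribL level)).sum_eq : _)]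
  exact (loops_eq diffs times limit _ _ _ _ _ hfe _ 0 1 _).symm ▸ rfl
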